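-- pv_equiv track=rewrite | github.com/shivatmax/AICODER | main.py | compare_tokens
-- ===== SOURCE A (Python) =====
-- from typing import List, Tuple
--
-- def compare_tokens(spec_tokens: List[str], actual_tokens: List[str]) -> Tuple[List[str], int]:
--     correct_tokens = []
--     for i, (spec, actual) in enumerate(zip(spec_tokens, actual_tokens)):
--         if spec.lower() == actual.lower():
--             correct_tokens.append(spec)
--         else:
--             return correct_tokens, i
--     return correct_tokens, len(correct_tokens)
-- ===== SOURCE B (Python) =====
-- def compare_tokens(spec_tokens, actual_tokens):
--     n = min(len(spec_tokens), len(actual_tokens))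
--     k = next((i for i, (s, a) in enumerate(zip(spec_tokens, actual_tokens))
--               if s.lower() != a.lower()), n)
--     return spec_tokens[:k], k
-- ===== Notes on version B (the rewrite author's own statement) =====
-- stated objective: simpler
-- what changed: Replaces A's accumulating loop with two exit points by a find-first-mismatch-index then slice decomposition: compute k and return spec_tokens[:k], k.
import Mathlib
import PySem

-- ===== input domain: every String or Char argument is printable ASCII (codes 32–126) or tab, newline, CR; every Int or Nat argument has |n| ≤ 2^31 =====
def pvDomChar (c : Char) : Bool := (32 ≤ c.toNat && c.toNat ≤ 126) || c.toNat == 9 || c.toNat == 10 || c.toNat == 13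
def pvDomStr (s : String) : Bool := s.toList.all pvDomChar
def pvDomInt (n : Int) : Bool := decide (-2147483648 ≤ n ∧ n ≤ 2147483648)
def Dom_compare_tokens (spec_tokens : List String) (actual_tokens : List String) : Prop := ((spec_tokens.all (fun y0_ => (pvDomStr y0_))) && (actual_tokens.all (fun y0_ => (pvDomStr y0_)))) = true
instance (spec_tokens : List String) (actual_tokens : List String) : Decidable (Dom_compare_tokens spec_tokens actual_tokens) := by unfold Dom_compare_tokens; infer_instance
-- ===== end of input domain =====

-- B replaces A's accumulating loop (two exit points) with a find-first-mismatch-index-then-slice decomposition: simpler.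


-- ===== PORT A =====
-- loop over enumerate(zip(spec, actual)) carrying the accumulator and the current index
def compareTokensLoopA : List (String × String) → List String → Nat → List String × Int
  | [], acc, _ => (acc, (acc.length : Int))
  | (spec, actual) :: rest, acc, i =>
      if PySem.Str.lower spec = PySem.Str.lower actual then
        compareTokensLoopA rest (acc ++ [spec]) (i + 1)
      else
        (acc, (i : Int))

def compare_tokens (spec_tokens : List String) (actual_tokens : List String) : List String × Int :=
  compareTokensLoopA (spec_tokens.zip actual_tokens) [] 0

-- ===== PORT B =====
-- index of the first case-insensitive mismatch in the zipped pairs (= length when none)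
def firstMismatch : List (String × String) → Nat
  | [] => 0
  | (s, a) :: rest =>
      if PySem.Str.lower s ≠ PySem.Str.lower a then 0 else firstMismatch rest + 1

def compare_tokens_alt (spec_tokens : List String) (actual_tokens : List String) : List String × Int :=
  let k := firstMismatch (spec_tokens.zip actual_tokens)
  (PySem.List.slice spec_tokens none (some (k : Int)), (k : Int))

-- ===== PRECONDITION & SPEC =====
def Spec_compare_tokens (spec_tokens : List String) (actual_tokens : List String) (out : List String × Int) : Prop := out = compare_tokens_alt spec_tokens actual_tokens
instance (spec_tokens : List String) (actual_tokens : List String) (out : List String × Int) : Decidable (Spec_compare_tokens spec_tokens actual_tokens out) := by unfold Spec_compare_tokens; infer_instance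

-- ===== CLAIM (what is proved, stated in full; the proofs are below) =====
def Claim_equal_compare_tokens : Prop := ∀ (spec_tokens : List String) (actual_tokens : List String), Dom_compare_tokens spec_tokens actual_tokens → Spec_compare_tokens spec_tokens actual_tokens (compare_tokens spec_tokens actual_tokens)

-- ===== LEMMAS AND PROOFS =====

theorem compareTokensLoopA_eq (z : List (String × String)) :
    ∀ (acc : List String),
      compareTokensLoopA z acc acc.length =
        (acc ++ ((z.map Prod.fst).take (firstMismatch z)),
          ((acc.length + firstMismatch z : Nat) : Int)) := by
  induction z with
  | nil => intro acc; simp [compareTokensLoopA, firstMismatch]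
  | cons p rest ih =>
      intro acc
      obtain ⟨s, a⟩ := p
      by_cases h : PySem.Str.lower s = PySem.Str.lower a
      · have : (acc ++ [s]).length = acc.length + 1 := by simp
        simp only [compareTokensLoopA, firstMismatch, h, if_pos, ite_not]
        rw [← this, ih (acc ++ [s])]
        simp
        ring
      · simp [compareTokensLoopA, firstMismatch, h]

theorem slice_take (xs : List String) (k : Nat) :
    PySem.List.slice xs none (some (k : Int)) = xs.take k := by
  simpa using PySem.List.slice_to xs k

-- ===== VERDICT (by name: the statement is the Claim_ definition above) =====
theorem take_map_fst_zip (s t : List String) (k : Nat)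
    (hk : k ≤ (s.zip t).length) :
    ((s.zip t).map Prod.fst).take k = s.take k := by
  induction s generalizing t k with
  | nil => simp
  | cons x xs ih =>
      cases t with
      | nil => simp at hk; simp [hk]
      | cons y ys =>
          cases k with
          | zero => simp
          | succ k => simp_all

theorem compare_tokens_spec : Claim_equal_compare_tokens := by
  intro spec_tokens actual_tokens _
  unfold Spec_compare_tokens compare_tokens compare_tokens_alt
  have h := compareTokensLoopA_eq (spec_tokens.zip actual_tokens) []
  simp only [List.length_nil] at h
  simp only []
  rw [h, slice_take]
  have hk : firstMismatch (spec_tokens.zip actual_tokens) ≤ (spec_tokens.zip actual_tokens).length := by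
    induction (spec_tokens.zip actual_tokens) with
    | nil => simp [firstMismatch]
    | cons p rest ih => obtain ⟨a, b⟩ := p; by_cases h : PySem.Str.lower a = PySem.Str.lower b <;>
        simp [firstMismatch, h] <;> omega
  rw [take_map_fst_zip _ _ _ hk]
  simp
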